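-- pv_equiv track=rewrite | github.com/ai-kmu/etc | algorithm/2019/191029/inkyung.py | solution
-- ===== SOURCE A (Python) =====
-- def solution(A, B):
--     A = sorted(A)
--     B = sorted(B)
--     lst = []
--     for i in range(len(A)):
--         for j in range(len(B)):
--             if A[i] < B[j]:
--                 lst.append(B[j])
--                 B.remove(B[j])
--                 break
--     return len(lst)
-- ===== SOURCE B (Python) =====
-- def solution(A, B):
--     A = sorted(A)
--     B = sorted(B)
--     i = j = cnt = 0
--     while i < len(A) and j < len(B):
--         if A[i] < B[j]:
--             cnt += 1
--             i += 1
--         j += 1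
--     return cnt
-- ===== Notes on version B (the rewrite author's own statement) =====
-- stated objective: faster
-- what changed: Replaced the per-A-element linear scan plus list.remove over B (quadratic greedy) by a single two-pointer sweep over the two sorted lists.
import Mathlib
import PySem

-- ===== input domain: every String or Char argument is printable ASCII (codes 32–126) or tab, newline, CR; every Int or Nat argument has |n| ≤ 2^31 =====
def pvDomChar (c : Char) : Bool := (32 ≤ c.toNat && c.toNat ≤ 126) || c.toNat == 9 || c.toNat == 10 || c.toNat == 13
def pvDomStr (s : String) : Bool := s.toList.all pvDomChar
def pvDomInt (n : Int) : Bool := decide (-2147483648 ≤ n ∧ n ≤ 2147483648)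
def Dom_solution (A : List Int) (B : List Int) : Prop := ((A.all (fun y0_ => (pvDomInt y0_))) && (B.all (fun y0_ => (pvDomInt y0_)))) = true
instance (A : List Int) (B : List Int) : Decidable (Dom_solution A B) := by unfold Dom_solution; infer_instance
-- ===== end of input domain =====

-- B replaces A's per-element scan of B with list.remove (quadratic greedy) by one
-- two-pointer sweep over the two sorted lists; same return value, asymptotically faster.

-- ===== PORT A =====
-- inner 'for j in range(len(B)): if A[i] < B[j]: … break' — returns the first B[j] with a < B[j]
def pvInner (a : Int) : List Int → Option Int
  | [] => none
  | b :: bs => if a < b then some b else pvInner a bs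

def solution (A : List Int) (B : List Int) : Int :=
  let As := PySem.List.sorted A (fun x => x) false
  let Bs := PySem.List.sorted B (fun x => x) false
  let st := As.foldl (fun (st : List Int × List Int) a =>
      match pvInner a st.1 with
      | some b => ((PySem.List.remove? st.1 b).getD st.1, st.2 ++ [b])
      | none => st) (Bs, ([] : List Int))
  (st.2.length : Int)

-- ===== PORT B =====
-- the 'while i < len(A) and j < len(B)' two-pointer loop of Source B, as recursion on the lists
def pvTwo : List Int → List Int → Int
  | [], _ => 0
  | _ :: _, [] => 0
  | a :: as, b :: bs => if a < b then 1 + pvTwo as bs else pvTwo (a :: as) bs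
  termination_by as bs => as.length + bs.length

def solution_alt (A : List Int) (B : List Int) : Int :=
  pvTwo (PySem.List.sorted A (fun x => x) false) (PySem.List.sorted B (fun x => x) false)

-- ===== PRECONDITION & SPEC =====
def Spec_solution (A : List Int) (B : List Int) (out : Int) : Prop := out = solution_alt A B
instance (A : List Int) (B : List Int) (out : Int) : Decidable (Spec_solution A B out) := by unfold Spec_solution; infer_instance

-- ===== CLAIM (what is proved, stated in full; the proofs are below) =====
def Claim_equal_solution : Prop := ∀ (A : List Int) (B : List Int), Dom_solution A B → Spec_solution A B (solution A B)

-- ===== LEMMAS AND PROOFS =====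

-- A's greedy count as a plain recursion (proof-side restatement of A's fold)
def gcount : List Int → List Int → Nat
  | [], _ => 0
  | a :: as, B =>
    match pvInner a B with
    | some b => 1 + gcount as ((PySem.List.remove? B b).getD B)
    | none => gcount as B

theorem pvInner_some {a b : Int} : ∀ {B : List Int}, pvInner a B = some b → a < b ∧ b ∈ B := by
  intro B
  induction B with
  | nil => simp [pvInner]
  | cons x xs ih =>
    simp only [pvInner]
    split_ifs with h
    · rintro ⟨rfl⟩; exact ⟨h, List.mem_cons_self ..⟩
    · intro hx; rcases ih hx with ⟨h1, h2⟩; exact ⟨h1, List.mem_cons_of_mem _ h2⟩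

theorem gcount_nil : ∀ As, gcount As [] = 0 := by
  intro As; induction As with
  | nil => rfl
  | cons a as ih => simpa [gcount, pvInner] using ih

-- an element b that no later A-element can beat may be dropped from the front of B
theorem gcount_skip (b : Int) :
    ∀ (as B : List Int), (∀ x ∈ as, ¬ x < b) → gcount as (b :: B) = gcount as B := by
  intro as
  induction as with
  | nil => intro B _; rfl
  | cons x xs ih =>
    intro B h
    have hxb : ¬ x < b := h x (List.mem_cons_self ..)
    have htail : ∀ y ∈ xs, ¬ y < b := fun y hy => h y (List.mem_cons_of_mem _ hy)
    simp only [gcount, pvInner, if_neg hxb]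
    cases hs : pvInner x B with
    | none => exact ih B htail
    | some b' =>
      rcases pvInner_some hs with ⟨hlt, hmem⟩
      have hne : b ≠ b' := by
        intro he; exact hxb (he ▸ hlt)
      dsimp only
      rw [PySem.List.remove?_cons_of_ne B hne, PySem.List.remove?_eq_some_erase B b' hmem]
      simpa using ih (B.erase b') htail

theorem gcount_eq_pvTwo :
    ∀ (Bs As : List Int), Bs.Pairwise (· ≤ ·) → As.Pairwise (· ≤ ·) →
      (gcount As Bs : Int) = pvTwo As Bs := by
  intro Bs
  induction Bs with
  | nil =>
    intro As _ _
    cases As <;> simp [gcount_nil, pvTwo, gcount]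
  | cons b bs ih =>
    intro As hB hA
    cases As with
    | nil => simp [gcount, pvTwo]
    | cons a as =>
      by_cases hab : a < b
      · have : pvInner a (b :: bs) = some b := by simp [pvInner, hab]
        simp only [gcount, this, pvTwo, if_pos hab, PySem.List.remove?_cons_self, Option.getD_some]
        have := ih as hB.of_cons hA.of_cons
        push_cast
        omega
      · have hskip : ∀ x ∈ a :: as, ¬ x < b := by
          intro x hx
          rcases List.mem_cons.mp hx with rfl | hx'
          · exact hab
          · have hax : a ≤ x := (List.pairwise_cons.mp hA).1 x hx'
            intro hlt; exact hab (lt_of_le_of_lt hax hlt)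
        rw [gcount_skip b (a :: as) bs hskip]
        simp only [pvTwo, if_neg hab]
        exact ih (a :: as) hB.of_cons hA

theorem foldl_len :
    ∀ (As B lst : List Int),
      ((As.foldl (fun (st : List Int × List Int) a =>
          match pvInner a st.1 with
          | some b => ((PySem.List.remove? st.1 b).getD st.1, st.2 ++ [b])
          | none => st) (B, lst)).2).length = lst.length + gcount As B := by
  intro As
  induction As with
  | nil => intro B lst; simp [gcount]
  | cons a as ih =>
    intro B lst
    simp only [List.foldl_cons, gcount]
    cases hs : pvInner a B with
    | none => simpa using ih B lst
    | some b =>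
      dsimp only
      rw [ih]
      simp
      omega

-- ===== VERDICT (by name: the statement is the Claim_ definition above) =====
theorem solution_spec : Claim_equal_solution := by
  intro A B _
  unfold Spec_solution solution solution_alt
  have hA : (PySem.List.sorted A (fun x => x) false).Pairwise (· ≤ ·) := by
    simpa using PySem.List.sorted_pairwise A (fun x => x)
  have hB : (PySem.List.sorted B (fun x => x) false).Pairwise (· ≤ ·) := by
    simpa using PySem.List.sorted_pairwise B (fun x => x)
  simp only []
  rw [foldl_len]
  simpa using gcount_eq_pvTwo _ _ hB hA
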